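-- pv_equiv track=rewrite | github.com/naturalstupid/PyJHora | src/jhora/utils.py | parivritti_alternate
-- ===== SOURCE A (Python) =====
-- def parivritti_alternate(dcf,dirn=1):
--     """
--         Generates alternate parivritti tuple. Used for Somanatha method
--         Odd Rasis get increasing rasis from Ar. Even rasis get decreasing rasis from Pi
--         For Hora Ar = (Ar,Ta), Ta = (Pi, Aq), Ge = (Ge,Cn), Cn = (Cp,Sg) and so on
--         @param varga divisional chart factor: 2=>Hora, 3=Drekkana etc
--         @return parivritti alternate tuple
--     """
--     pc = []
--     hs1 = 0; hs2 = 11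
--     for _ in range(0,12,2):
--         t1 = tuple(); t2 = tuple()
--         for _ in range(dcf):
--             t1 += (hs1%12,); hs1 = (hs1+dirn)%12
--             t2 += (hs2%12,); hs2 = (hs2-dirn)%12
--         pc.append(t1); pc.append(t2)
--     return pc
-- ===== SOURCE B (Python) =====
-- def parivritti_alternate(dcf, dirn=1):
--     """Stateless re-implementation: each element is computed directly from its
--     global step index k*dcf+j instead of mutating running counters hs1/hs2."""
--     pc = []
--     for k in range(6):
--         pc.append(tuple(((k * dcf + j) * dirn) % 12 for j in range(dcf)))
--         pc.append(tuple((11 - (k * dcf + j) * dirn) % 12 for j in range(dcf)))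
--     return pc
-- ===== Notes on version B (the rewrite author's own statement) =====
-- stated objective: faster
-- what changed: Replaced the running counters hs1/hs2 mutated across both loops by a closed-form index formula ((k*dcf+j)*dirn) % 12, and replaced A's repeated tuple concatenation t1 += (x,) (which rebuilds the tuple each step, O(dcf^2)) by a single tuple(...) per chart.
import Mathlib
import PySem

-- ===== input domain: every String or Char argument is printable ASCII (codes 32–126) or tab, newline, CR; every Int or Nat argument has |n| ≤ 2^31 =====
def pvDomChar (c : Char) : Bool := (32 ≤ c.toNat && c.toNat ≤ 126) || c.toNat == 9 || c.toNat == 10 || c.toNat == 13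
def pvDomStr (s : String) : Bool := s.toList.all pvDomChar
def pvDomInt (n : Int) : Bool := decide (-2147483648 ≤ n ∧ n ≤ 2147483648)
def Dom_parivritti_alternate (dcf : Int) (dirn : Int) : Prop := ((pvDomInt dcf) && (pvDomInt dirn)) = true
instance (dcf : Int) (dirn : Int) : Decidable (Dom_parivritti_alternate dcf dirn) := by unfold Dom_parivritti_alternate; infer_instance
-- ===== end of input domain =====

-- B drops A's running counters hs1/hs2 and computes each element in closed form from its
-- global step index (k*dcf+j), building each tuple in one pass instead of by repeated
-- tuple concatenation (measured faster at large dcf; objective: faster).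

-- ===== PORT A =====
-- one step of A's inner 'for _ in range(dcf)' loop over the state (t1, t2, hs1, hs2)
def pvInnerA (dirn : Int) (st : List Int × Int × List Int × Int) (_ : Int) :
    List Int × Int × List Int × Int :=
  (st.1 ++ [PySem.Int.mod st.2.1 12],
   PySem.Int.mod (st.2.1 + dirn) 12,
   st.2.2.1 ++ [PySem.Int.mod st.2.2.2 12],
   PySem.Int.mod (st.2.2.2 - dirn) 12)

def parivritti_alternate (dcf : Int) (dirn : Int) : List (List Int) :=
  ((PySem.List.pyRange 0 12 2).foldl
    (fun (st : List (List Int) × Int × Int) _ =>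
      let r := (PySem.List.pyRange 0 dcf 1).foldl (pvInnerA dirn) ([], st.2.1, [], st.2.2)
      (st.1 ++ [r.1, r.2.2.1], r.2.1, r.2.2.2))
    ([], 0, 11)).1

-- ===== PORT B =====
def parivritti_alternate_alt (dcf : Int) (dirn : Int) : List (List Int) :=
  (PySem.List.pyRange 0 6 1).foldl
    (fun pc k =>
      pc ++ [(PySem.List.pyRange 0 dcf 1).map (fun j => PySem.Int.mod ((k * dcf + j) * dirn) 12),
             (PySem.List.pyRange 0 dcf 1).map (fun j => PySem.Int.mod (11 - (k * dcf + j) * dirn) 12)])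
    []

-- ===== PRECONDITION & SPEC =====
def Spec_parivritti_alternate (dcf : Int) (dirn : Int) (out : List (List Int)) : Prop := out = parivritti_alternate_alt dcf dirn
instance (dcf : Int) (dirn : Int) (out : List (List Int)) : Decidable (Spec_parivritti_alternate dcf dirn out) := by unfold Spec_parivritti_alternate; infer_instance

-- ===== CLAIM (what is proved, stated in full; the proofs are below) =====
def Claim_equal_parivritti_alternate : Prop := ∀ (dcf : Int) (dirn : Int), Dom_parivritti_alternate dcf dirn → Spec_parivritti_alternate dcf dirn (parivritti_alternate dcf dirn)

-- ===== LEMMAS AND PROOFS =====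

theorem pvMod12 (a : Int) : PySem.Int.mod a 12 = a % 12 :=
  PySem.Int.mod_eq_emod_of_pos (by norm_num)

-- the inner loop, characterised in closed form: processing positions a..b-1 with
-- state corresponding to global offset s+a
theorem pvInner_eq (dirn s : Int) : ∀ (n : Nat) (a b : Int), (b - a).toNat = n →
    ∀ (t1 t2 : List Int) (hs1 hs2 : Int),
    hs1 = ((s + a) * dirn) % 12 → hs2 = (11 - (s + a) * dirn) % 12 →
    (PySem.List.pyRange a b 1).foldl (pvInnerA dirn) (t1, hs1, t2, hs2)
      = (t1 ++ (PySem.List.pyRange a b 1).map (fun j => ((s + j) * dirn) % 12),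
         ((s + max a b) * dirn) % 12,
         t2 ++ (PySem.List.pyRange a b 1).map (fun j => (11 - (s + j) * dirn) % 12),
         (11 - (s + max a b) * dirn) % 12) := by
  intro n
  induction n with
  | zero =>
    intro a b hn t1 t2 hs1 hs2 h1 h2
    have hba : b ≤ a := by omega
    rw [PySem.List.pyRange_one_eq_nil hba]
    simp [h1, h2, max_eq_left hba]
  | succ m ih =>
    intro a b hn t1 t2 hs1 hs2 h1 h2
    have hab : a < b := by omega
    rw [PySem.List.pyRange_one_cons hab]
    simp only [List.foldl_cons, List.map_cons]
    have hstep : pvInnerA dirn (t1, hs1, t2, hs2) a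
        = (t1 ++ [((s + a) * dirn) % 12],
           ((s + (a + 1)) * dirn) % 12,
           t2 ++ [(11 - (s + a) * dirn) % 12],
           (11 - (s + (a + 1)) * dirn) % 12) := by
      simp only [pvInnerA, pvMod12, h1, h2]
      have e1 : (s + a) * dirn % 12 % 12 = (s + a) * dirn % 12 := by omega
      have e3 : (11 - (s + a) * dirn) % 12 % 12 = (11 - (s + a) * dirn) % 12 := by omega
      have e2 : ((s + a) * dirn % 12 + dirn) % 12 = (s + (a + 1)) * dirn % 12 := by
        have h : (s + (a + 1)) * dirn = (s + a) * dirn + dirn := by ring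
        rw [h]; omega
      have e4 : ((11 - (s + a) * dirn) % 12 - dirn) % 12 = (11 - (s + (a + 1)) * dirn) % 12 := by
        have h : 11 - (s + (a + 1)) * dirn = 11 - (s + a) * dirn - dirn := by ring
        rw [h]; omega
      rw [e1, e2, e3, e4]
    rw [hstep,
        ih (a + 1) b (by omega) (t1 ++ [((s + a) * dirn) % 12])
          (t2 ++ [(11 - (s + a) * dirn) % 12]) _ _ rfl rfl]
    have hmax : max (a + 1) b = max a b := by omega
    simp [hmax]

-- the inner loop starting at position 0, global offset s
theorem pvInner0 (dirn s dcf : Int) (t1 t2 : List Int) (hs1 hs2 : Int)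
    (h1 : hs1 = (s * dirn) % 12) (h2 : hs2 = (11 - s * dirn) % 12) :
    (PySem.List.pyRange 0 dcf 1).foldl (pvInnerA dirn) (t1, hs1, t2, hs2)
      = (t1 ++ (PySem.List.pyRange 0 dcf 1).map (fun j => ((s + j) * dirn) % 12),
         ((s + max 0 dcf) * dirn) % 12,
         t2 ++ (PySem.List.pyRange 0 dcf 1).map (fun j => (11 - (s + j) * dirn) % 12),
         (11 - (s + max 0 dcf) * dirn) % 12) := by
  exact pvInner_eq dirn s (dcf - 0).toNat 0 dcf rfl t1 t2 hs1 hs2 (by simpa using h1)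
    (by simpa using h2)

-- ===== VERDICT (by name: the statement is the Claim_ definition above) =====
theorem parivritti_alternate_spec : Claim_equal_parivritti_alternate := by
  intro dcf dirn _
  unfold Spec_parivritti_alternate parivritti_alternate parivritti_alternate_alt
  rw [show PySem.List.pyRange 0 12 2 = [0, 2, 4, 6, 8, 10] from by decide,
      show PySem.List.pyRange 0 6 1 = [0, 1, 2, 3, 4, 5] from by decide]
  simp only [List.foldl_cons, List.foldl_nil]
  rw [pvInner0 dirn 0 dcf [] [] 0 11 (by simp) (by norm_num)]
  rw [pvInner0 dirn (0 + max 0 dcf) dcf [] [] _ _ rfl rfl]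
  rw [pvInner0 dirn (0 + max 0 dcf + max 0 dcf) dcf [] [] _ _ rfl rfl]
  rw [pvInner0 dirn (0 + max 0 dcf + max 0 dcf + max 0 dcf) dcf [] [] _ _ rfl rfl]
  rw [pvInner0 dirn (0 + max 0 dcf + max 0 dcf + max 0 dcf + max 0 dcf) dcf [] [] _ _ rfl rfl]
  rw [pvInner0 dirn (0 + max 0 dcf + max 0 dcf + max 0 dcf + max 0 dcf + max 0 dcf) dcf [] [] _ _ rfl rfl]
  by_cases hd : dcf ≤ 0
  · rw [PySem.List.pyRange_one_eq_nil hd]; simp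
  · have hmax : max 0 dcf = dcf := max_eq_right (by omega)
    simp only [hmax, pvMod12, List.nil_append, List.cons_append]
    refine congrArg₂ _ ?_ (congrArg₂ _ ?_ (congrArg₂ _ ?_ (congrArg₂ _ ?_ (congrArg₂ _ ?_
      (congrArg₂ _ ?_ (congrArg₂ _ ?_ (congrArg₂ _ ?_ (congrArg₂ _ ?_ (congrArg₂ _ ?_
      (congrArg₂ _ ?_ (congrArg₂ _ ?_ rfl))))))))))) <;>
      (apply List.map_congr_left; intro j _; ring_nf)
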